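-- pv_equiv track=rewrite | github.com/Tao-Robominds/CSIC_Agent | backend/workflows/todo_panel_coordinator.py | _extract_participants_from_todo
-- ===== SOURCE A (Python) =====
-- from typing import List, Dict, Any
--
-- def _extract_participants_from_todo(todo: Dict[str, Any]) -> List[str]:
--     """Extract relevant participants from todo solutions."""
--     participants = set()
--     solutions = todo.get('solutions', [])
--
--     # Common executive titles to look for
--     executives = {'CEO', 'CMO', 'CFO'}
--
--     # Look for executives in solutions
--     for solution in solutions:
--         words = solution.upper().split()
--         participants.update(exec_title for exec_title in executives if exec_title in words)
--
--     return list(participants)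
-- ===== SOURCE B (Python) =====
-- def _extract_participants_from_todo(todo):
--     """Extract relevant participants from todo solutions."""
--     # Stage 1: gather every uppercased word across all solutions into one set.
--     all_words = set()
--     for solution in todo.get('solutions', []):
--         all_words.update(solution.upper().split())
--     # Stage 2: one set intersection against the fixed executive titles.
--     return list({'CEO', 'CMO', 'CFO'} & all_words)
-- ===== Notes on version B (the rewrite author's own statement) =====
-- stated objective: simpler
-- what changed: Replaces A's per-solution inner scan (filtering the executives set against each solution's words and incrementally updating a participants set) by a gather-then-intersect shape: one pass collects all words of all solutions into a single set, then one set intersection with {'CEO','CMO','CFO'} produces the result.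
import Mathlib
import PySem

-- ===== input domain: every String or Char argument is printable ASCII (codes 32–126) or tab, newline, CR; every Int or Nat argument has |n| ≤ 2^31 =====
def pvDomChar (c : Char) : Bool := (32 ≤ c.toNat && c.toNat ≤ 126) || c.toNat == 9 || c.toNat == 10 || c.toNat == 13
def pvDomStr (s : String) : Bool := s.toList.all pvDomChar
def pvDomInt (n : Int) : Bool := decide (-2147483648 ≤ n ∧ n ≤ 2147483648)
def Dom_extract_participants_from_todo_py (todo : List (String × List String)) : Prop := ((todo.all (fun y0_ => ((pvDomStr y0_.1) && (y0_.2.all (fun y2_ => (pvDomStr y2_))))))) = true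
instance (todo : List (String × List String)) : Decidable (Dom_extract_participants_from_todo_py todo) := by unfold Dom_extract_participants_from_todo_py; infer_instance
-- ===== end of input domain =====

-- B replaces A's per-solution scan (filter the executives set against each solution's words,
-- incrementally updating a participants set) by gather-then-intersect: one pass collects every
-- word of every solution into one set, then a single intersection with {'CEO','CMO','CFO'}.
-- Python's list(set) iteration order is hash-based and not modelled (PYSEM.md); both ports
-- enumerate the resulting set in sorted order, which is exact as a set (outputs are compared as sets).

-- ===== PORT A =====
def extract_participants_from_todo_py (todo : List (String × List String)) : List String :=
  let participants : PySem.Set String := PySem.Set.empty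
  let solutions := PySem.Dict.getD (PySem.Dict.mk todo) "solutions" []
  let executives : PySem.Set String := PySem.Set.ofList ["CEO", "CMO", "CFO"]
  let participants := solutions.foldl (fun p solution =>
      let words := PySem.Str.split₀ (PySem.Str.upper solution)
      PySem.Set.update p (executives.filter (fun e => words.contains e))) participants
  -- list(participants): hash order, not modelled — enumerated sorted (exact as a set)
  PySem.List.sorted participants (fun x => x) false

-- ===== PORT B =====
def extract_participants_from_todo_py_alt (todo : List (String × List String)) : List String :=
  let all_words : PySem.Set String :=
    (PySem.Dict.getD (PySem.Dict.mk todo) "solutions" []).foldl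
      (fun w solution => PySem.Set.update w (PySem.Str.split₀ (PySem.Str.upper solution)))
      PySem.Set.empty
  -- list({'CEO','CMO','CFO'} & all_words): hash order, not modelled — enumerated sorted (exact as a set)
  PySem.List.sorted (PySem.Set.inter (PySem.Set.ofList ["CEO", "CMO", "CFO"]) all_words)
    (fun x => x) false

-- ===== PRECONDITION & SPEC =====
def Spec_extract_participants_from_todo_py (todo : List (String × List String)) (out : List String) : Prop := out = extract_participants_from_todo_py_alt todo
instance (todo : List (String × List String)) (out : List String) : Decidable (Spec_extract_participants_from_todo_py todo out) := by unfold Spec_extract_participants_from_todo_py; infer_instance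

-- ===== CLAIM (what is proved, stated in full; the proofs are below) =====
def Claim_equal_extract_participants_from_todo_py : Prop := ∀ (todo : List (String × List String)), Dom_extract_participants_from_todo_py todo → Spec_extract_participants_from_todo_py todo (extract_participants_from_todo_py todo)

-- ===== LEMMAS AND PROOFS =====

-- membership in a fold of Set.update: x was collected iff some processed element contributed it
theorem pv_mem_foldl_update (f : String → List String) :
    ∀ (sols : List String) (p : PySem.Set String) (x : String),
      (x ∈ sols.foldl (fun a s => PySem.Set.update a (f s)) p) ↔ (x ∈ p ∨ ∃ s ∈ sols, x ∈ f s) := by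
  intro sols
  induction sols with
  | nil => intro p x; simp
  | cons s rest ih =>
    intro p x
    rw [List.foldl_cons, ih, PySem.Set.mem_update]
    constructor
    · rintro (⟨h | h⟩ | ⟨t, ht, hx⟩)
      · exact Or.inl h
      · exact Or.inr ⟨s, by simp, h⟩
      · exact Or.inr ⟨t, by simp [ht], hx⟩
    · rintro (h | ⟨t, ht, hx⟩)
      · exact Or.inl (Or.inl h)
      · rcases List.mem_cons.mp ht with rfl | ht'
        · exact Or.inl (Or.inr hx)
        · exact Or.inr ⟨t, ht', hx⟩

-- a fold of Set.update keeps the no-duplicates invariant of a Set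
theorem pv_nodup_foldl_update (f : String → List String) :
    ∀ (sols : List String) (p : PySem.Set String), p.Nodup →
      (sols.foldl (fun a s => PySem.Set.update a (f s)) p).Nodup := by
  intro sols
  induction sols with
  | nil => intro p hp; simpa using hp
  | cons s rest ih =>
    intro p hp
    exact ih _ (PySem.Set.nodup_update p (f s) hp)

-- ===== VERDICT (by name: the statement is the Claim_ definition above) =====
theorem extract_participants_from_todo_py_spec : Claim_equal_extract_participants_from_todo_py := by
  intro todo _
  unfold Spec_extract_participants_from_todo_py extract_participants_from_todo_py extract_participants_from_todo_py_alt
  set sols := PySem.Dict.getD (PySem.Dict.mk todo) "solutions" [] with hsols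
  rw [PySem.List.sorted_id_eq_sorted_id_iff_perm]
  have hE : ((PySem.Set.ofList ["CEO", "CMO", "CFO"]) : PySem.Set String)
      = ["CEO", "CMO", "CFO"] := by decide
  have hnodupA : (sols.foldl (fun p solution =>
      PySem.Set.update p ((PySem.Set.ofList ["CEO", "CMO", "CFO"] : PySem.Set String).filter
        (fun e => (PySem.Str.split₀ (PySem.Str.upper solution)).contains e))) PySem.Set.empty).Nodup :=
    pv_nodup_foldl_update _ sols PySem.Set.empty (by simp [PySem.Set.empty])
  have hnodupB : (PySem.Set.inter (PySem.Set.ofList ["CEO", "CMO", "CFO"])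
      (sols.foldl (fun w solution =>
        PySem.Set.update w (PySem.Str.split₀ (PySem.Str.upper solution))) PySem.Set.empty)).Nodup :=
    PySem.Set.nodup_inter _ _ (by decide)
  rw [List.perm_ext_iff_of_nodup hnodupA hnodupB]
  intro x
  rw [pv_mem_foldl_update (fun solution =>
      (PySem.Set.ofList ["CEO", "CMO", "CFO"] : PySem.Set String).filter
        (fun e => (PySem.Str.split₀ (PySem.Str.upper solution)).contains e)) sols PySem.Set.empty x,
    PySem.Set.mem_inter,
    pv_mem_foldl_update (fun solution => PySem.Str.split₀ (PySem.Str.upper solution)) sols PySem.Set.empty x]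
  simp only [hE, PySem.Set.empty, List.not_mem_nil, false_or, List.mem_filter,
    List.contains_eq_mem, decide_eq_true_eq]
  constructor
  · rintro ⟨s, hs, hxE, hxw⟩; exact ⟨hxE, s, hs, hxw⟩
  · rintro ⟨hxE, s, hs, hxw⟩; exact ⟨s, hs, hxE, hxw⟩
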